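-- pv_equiv track=rewrite | github.com/lwaw/UK-Biobank-risk-factors-ML | UKB_tools/preprocessing.py | select_column_names
-- ===== SOURCE A (Python) =====
-- def select_column_names(select_column: list, columns: list, add_eid: int = 0) -> list:
--     select_columns = []
--     for select in select_column:
--         select = select.split("-")[0]
--
--         for column in columns:
--             if column.startswith(select):
--                 select_columns.append(column)
--
--     if add_eid == 1:
--         select_columns.append("eid")
--
--     return select_columns
-- ===== SOURCE B (Python) =====
-- def select_column_names(select_column: list, columns: list, add_eid: int = 0) -> list:
--     # One column-major pass: each column is dispatched into a bucket per prefix,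
--     # buckets are concatenated at the end (same select-major output order as before).
--     prefixes = [s.split("-")[0] for s in select_column]
--     buckets = [[] for _ in prefixes]
--     for column in columns:
--         for i, p in enumerate(prefixes):
--             if column.startswith(p):
--                 buckets[i].append(column)
--     out = []
--     for b in buckets:
--         out.extend(b)
--     if add_eid == 1:
--         out.append("eid")
--     return out
-- ===== Notes on version B (the rewrite author's own statement) =====
-- stated objective: alternative
-- what changed: Replaced the select-major nested scan appending to one list by a single column-major pass that dispatches each column into a per-prefix bucket (prefixes precomputed once), concatenating the buckets at the end.
import Mathlib
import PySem

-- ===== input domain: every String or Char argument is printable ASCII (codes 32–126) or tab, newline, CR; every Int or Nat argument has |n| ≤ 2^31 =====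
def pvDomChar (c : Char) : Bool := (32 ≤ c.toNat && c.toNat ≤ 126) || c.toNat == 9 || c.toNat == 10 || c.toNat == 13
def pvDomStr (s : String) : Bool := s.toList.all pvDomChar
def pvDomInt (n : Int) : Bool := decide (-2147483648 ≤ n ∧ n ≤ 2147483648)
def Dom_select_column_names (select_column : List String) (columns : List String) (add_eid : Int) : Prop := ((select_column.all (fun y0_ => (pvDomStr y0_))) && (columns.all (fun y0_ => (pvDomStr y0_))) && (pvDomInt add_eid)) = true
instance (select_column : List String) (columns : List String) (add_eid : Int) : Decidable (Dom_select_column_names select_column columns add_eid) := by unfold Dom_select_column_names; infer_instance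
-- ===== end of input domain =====

-- B restructures the traversal: one column-major pass into per-prefix buckets instead of A's select-major nested scan; same output.

-- ===== PORT A =====
def select_column_names (select_column : List String) (columns : List String) (add_eid : Int) : List String :=
  let select_columns := select_column.foldl (fun acc select =>
    let s := ((PySem.Str.split? select "-").getD []).headD ""   -- select = select.split("-")[0] (split is never empty)
    columns.foldl (fun acc2 column =>
      if PySem.Str.startswith column s then acc2 ++ [column] else acc2) acc) []
  if add_eid == 1 then select_columns ++ ["eid"] else select_columns

-- ===== PORT B =====
def select_column_names_alt (select_column : List String) (columns : List String) (add_eid : Int) : List String :=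
  let prefixes := select_column.map (fun s => ((PySem.Str.split? s "-").getD []).headD "")
  let buckets := columns.foldl (fun (bs : List (List String)) column =>
    (prefixes.zip bs).map (fun pb =>
      if PySem.Str.startswith column pb.1 then pb.2 ++ [column] else pb.2))
    (prefixes.map (fun _ => []))
  let out := buckets.foldl (fun acc b => acc ++ b) []
  if add_eid == 1 then out ++ ["eid"] else out

-- ===== PRECONDITION & SPEC =====
def Spec_select_column_names (select_column : List String) (columns : List String) (add_eid : Int) (out : List String) : Prop := out = select_column_names_alt select_column columns add_eid
instance (select_column : List String) (columns : List String) (add_eid : Int) (out : List String) : Decidable (Spec_select_column_names select_column columns add_eid out) := by unfold Spec_select_column_names; infer_instance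

-- ===== CLAIM (what is proved, stated in full; the proofs are below) =====
def Claim_equal_select_column_names : Prop := ∀ (select_column : List String) (columns : List String) (add_eid : Int), Dom_select_column_names select_column columns add_eid → Spec_select_column_names select_column columns add_eid (select_column_names select_column columns add_eid)

-- ===== LEMMAS AND PROOFS =====

-- A's outer loop equals a flatMap of per-select filters of columns.
theorem a_core_eq (columns : List String) (sel : List String) (acc : List String) :
    sel.foldl (fun acc select =>
        columns.foldl (fun acc2 column =>
          if PySem.Str.startswith column (((PySem.Str.split? select "-").getD []).headD "") then acc2 ++ [column] else acc2) acc) acc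
      = acc ++ sel.flatMap (fun s => columns.filter (fun c => PySem.Str.startswith c (((PySem.Str.split? s "-").getD []).headD ""))) := by
  simp only [PySem.List.foldl_append_if_eq_filter, PySem.List.foldl_append_eq_flatMap]

-- zip-map fusion used by the bucket-update step.
theorem zip_map_map {α β γ : Type} (f : α → β) (g : α × β → γ) :
    ∀ (ps : List α), ((ps.zip (ps.map f)).map g) = ps.map (fun p => g (p, f p)) := by
  intro ps
  induction ps with
  | nil => rfl
  | cons p rest ih => simp [ih]

-- B's bucket invariant: after folding over cs, bucket of prefix p holds f p ++ filter of cs.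
theorem buckets_eq (ps : List String) :
    ∀ (cs : List String) (f : String → List String),
      cs.foldl (fun (bs : List (List String)) column =>
          (ps.zip bs).map (fun pb =>
            if PySem.Str.startswith column pb.1 then pb.2 ++ [column] else pb.2))
        (ps.map f)
      = ps.map (fun p => f p ++ cs.filter (fun c => PySem.Str.startswith c p)) := by
  intro cs
  induction cs with
  | nil => intro f; simp
  | cons c rest ih =>
      intro f
      simp only [List.foldl_cons, zip_map_map]
      rw [ih (fun q => if PySem.Str.startswith c q then f q ++ [c] else f q)]
      apply List.map_congr_left
      intro p _
      simp only [List.filter_cons]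
      by_cases h : PySem.Str.startswith c p <;> simp [PySem.Str.startswith] at h ⊢ <;>
        simp [h]

-- ===== VERDICT (by name: the statement is the Claim_ definition above) =====
theorem select_column_names_spec : Claim_equal_select_column_names := by
  intro sel cols add_eid _
  unfold Spec_select_column_names select_column_names select_column_names_alt
  simp only [buckets_eq, a_core_eq, PySem.List.foldl_append_eq_flatten, List.nil_append]
  simp [List.flatMap, Function.comp_def]
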